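-- pv_equiv track=rewrite | github.com/0masiza0/folder | test.py | f
-- ===== SOURCE A (Python) =====
-- def f(a, l, r):
--     if r - l < 2:
--         return r, l
--     mid = (r + l) // 2
--     if a[l] < a[mid] and a[r] < a[mid]:
--         return f(a, mid, r)
--     if a[r] > a[mid] and a[l] > a[mid]:
--         return f(a, l, mid)
--     return f(a, mid, r)
-- ===== SOURCE B (Python) =====
-- def f(a, l, r):
--     # iterative binary descent over the interval with explicit state;
--     # the two descend-right cases of A collapse into the single "else"
--     while r - l >= 2:
--         mid = (r + l) // 2
--         am = a[mid]
--         if a[r] > am and a[l] > am: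
--             r = mid
--         else:
--             l = mid
--     return r, l
-- ===== Notes on version B (the rewrite author's own statement) =====
-- stated objective: simpler
-- what changed: Replaces the tail recursion with an explicit while loop over (l, r) state and collapses A's first and third branches (which both descend to (mid, r)) into a single else, leaving one disjoint test.
import Mathlib
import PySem

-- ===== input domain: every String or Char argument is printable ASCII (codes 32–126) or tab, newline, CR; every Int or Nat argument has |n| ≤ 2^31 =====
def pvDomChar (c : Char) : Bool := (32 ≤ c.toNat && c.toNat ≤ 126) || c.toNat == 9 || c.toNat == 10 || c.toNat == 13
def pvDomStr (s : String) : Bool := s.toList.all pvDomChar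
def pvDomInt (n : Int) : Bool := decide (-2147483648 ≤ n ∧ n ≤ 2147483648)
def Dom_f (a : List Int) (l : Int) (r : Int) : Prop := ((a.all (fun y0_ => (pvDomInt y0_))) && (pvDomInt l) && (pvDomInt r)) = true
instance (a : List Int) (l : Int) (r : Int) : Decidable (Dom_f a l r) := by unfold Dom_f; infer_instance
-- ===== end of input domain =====

-- B replaces A's tail recursion by an explicit while loop over (l, r) state and merges
-- A's first and third branches (both descend to (mid, r)) into one else (objective: simpler).
-- Both ports use a fuel argument (r - l).toNat as a pure totality guard: each descent
-- shrinks r - l by at least 1, so the fuel never runs out on the Python execution path.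

-- ===== PORT A =====
def fGo (a : List Int) : Nat → Int → Int → Int × Int
  | 0, l, r => (r, l)                      -- fuel exhausted: only reachable with r - l ≤ 0 < 2
  | n + 1, l, r =>
    if r - l < 2 then (r, l)
    else
      let mid := PySem.Int.floordiv (r + l) 2
      match PySem.List.pyGet? a l, PySem.List.pyGet? a mid, PySem.List.pyGet? a r with
      | some al, some am, some ar =>
          if al < am ∧ ar < am then fGo a n mid r
          else if ar > am ∧ al > am then fGo a n l mid
          else fGo a n mid r
      | _, _, _ => (r, l)                  -- IndexError in Python; excluded by Pre_f

def f (a : List Int) (l : Int) (r : Int) : Int × Int := fGo a (r - l).toNat l r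

-- ===== PORT B =====
-- the while loop of Source B, as a fueled step function over the state pair (l, r)
def fAltLoop (a : List Int) : Nat → Int × Int → Int × Int
  | 0, s => (s.2, s.1)
  | n + 1, s =>
    if 2 ≤ s.2 - s.1 then
      let mid := PySem.Int.floordiv (s.2 + s.1) 2
      let am := (PySem.List.pyGet? a mid).getD 0
      if (PySem.List.pyGet? a s.2).getD 0 > am ∧ (PySem.List.pyGet? a s.1).getD 0 > am
      then fAltLoop a n (s.1, mid)
      else fAltLoop a n (mid, s.2)
    else (s.2, s.1)

def f_alt (a : List Int) (l : Int) (r : Int) : Int × Int := fAltLoop a (r - l).toNat (l, r)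

-- ===== PRECONDITION & SPEC =====
-- Pre_f: exactly the inputs where A raises no IndexError: either the interval is already
-- trivial, or both endpoint indices are valid Python indices (midpoints then stay valid).
def Pre_f (a : List Int) (l : Int) (r : Int) : Prop :=
  r - l < 2 ∨ (PySem.Raise.InRange a.length l ∧ PySem.Raise.InRange a.length r)
instance (a : List Int) (l : Int) (r : Int) : Decidable (Pre_f a l r) := by
  unfold Pre_f; infer_instance

def pvWitness_f : List Int × Int × Int := ([1, 3, 2], 0, 2)

def Spec_f (a : List Int) (l : Int) (r : Int) (out : Int × Int) : Prop := out = f_alt a l r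
instance (a : List Int) (l : Int) (r : Int) (out : Int × Int) : Decidable (Spec_f a l r out) := by
  unfold Spec_f; infer_instance

-- ===== CLAIM (what is proved, stated in full; the proofs are below) =====
def Claim_equal_f : Prop := ∀ (a : List Int) (l : Int) (r : Int), Dom_f a l r → Pre_f a l r → Spec_f a l r (f a l r)

-- ===== LEMMAS AND PROOFS =====

theorem pvMidBounds (l r : Int) (h : 2 ≤ r - l) :
    l + 1 ≤ PySem.Int.floordiv (r + l) 2 ∧ PySem.Int.floordiv (r + l) 2 ≤ r - 1 := by
  rw [PySem.Int.floordiv_eq_ediv_of_pos (by omega)]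
  omega

theorem pvInRange_iff (n : Nat) (i : Int) :
    PySem.Raise.InRange n i ↔ (-(n : Int) ≤ i ∧ i < n) := Iff.rfl

theorem pvGet_some (a : List Int) (i : Int) (h : PySem.Raise.InRange a.length i) :
    ∃ v, PySem.List.pyGet? a i = some v := by
  cases hx : PySem.List.pyGet? a i with
  | none => exact absurd ((PySem.List.pyGet?_eq_none_iff _ _).mp hx) (not_not_intro h)
  | some v => exact ⟨v, rfl⟩

theorem pvMain : ∀ (n : Nat) (a : List Int) (l r : Int), (r - l).toNat ≤ n →
    Pre_f a l r → fGo a n l r = fAltLoop a n (l, r) := by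
  intro n
  induction n with
  | zero => intro a l r _ _; rfl
  | succ n ih =>
    intro a l r hn hp
    by_cases h2 : r - l < 2
    · rw [fGo, fAltLoop]
      rw [if_pos h2, if_neg (by simpa using (by omega : ¬ 2 ≤ r - l))]
    · have hlr : PySem.Raise.InRange a.length l ∧ PySem.Raise.InRange a.length r := by
        rcases hp with h | h
        · omega
        · exact h
      have hmb := pvMidBounds l r (by omega)
      have hmid : PySem.Raise.InRange a.length (PySem.Int.floordiv (r + l) 2) := by
        have h1 := hlr.1; have h2 := hlr.2
        rw [pvInRange_iff] at h1 h2 ⊢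
        omega
      obtain ⟨al, hal⟩ := pvGet_some a l hlr.1
      obtain ⟨ar, har⟩ := pvGet_some a r hlr.2
      obtain ⟨am, ham⟩ := pvGet_some a _ hmid
      rw [fGo, fAltLoop]
      rw [if_neg h2, if_pos (by simpa using (by omega : 2 ≤ r - l))]
      simp only [hal, har, ham, Option.getD_some]
      by_cases hb : ar > am ∧ al > am
      · rw [if_neg (by omega), if_pos hb, if_pos hb]
        exact ih a l _ (by omega) (Or.inr ⟨hlr.1, hmid⟩)
      · rw [if_neg hb]
        have hrec : fGo a n (PySem.Int.floordiv (r + l) 2) r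
            = fAltLoop a n (PySem.Int.floordiv (r + l) 2, r) :=
          ih a _ r (by omega) (Or.inr ⟨hmid, hlr.2⟩)
        split_ifs <;> exact hrec

-- ===== VERDICT (by name: the statement is the Claim_ definition above) =====
theorem f_spec : Claim_equal_f := by
  intro a l r _ hp
  unfold Spec_f f_alt f
  exact pvMain (r - l).toNat a l r le_rfl hp
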